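-- pv_equiv track=rewrite | github.com/mike-taylor99/aoc-2024 | day20/part2.py | cheats
-- ===== SOURCE A (Python) =====
-- from typing import List, Tuple
--
-- def cheats(track: List[Tuple[int, int]], max_dist: int) -> List[int]:
--     """
--     Identifies potential cheating instances in a race track based on the given maximum distance.
--
--     Args:
--         track (List[Tuple[int, int]]): A list of tuples representing the coordinates (x, y) of each checkpoint on the track.
--         max_dist (int): The maximum allowable distance between two checkpoints to consider it as a valid move.
--
--     Returns:
--         List[int]: A list of integers representing the difference between the time indices of the checkpoints where cheating is detected.
--     """
--     results = []
--     for t1, (x1, y1) in enumerate(track):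
--         for t2 in range(t1 + 3, len(track)):
--             x2, y2 = track[t2]
--             dist = abs(x2 - x1) + abs(y2 - y1)
--             if dist <= max_dist and t2 - t1 > dist:
--                 results.append(t2 - t1 - dist)
--     return results
-- ===== SOURCE B (Python) =====
-- def cheats(track, max_dist):
--     groups = {}
--     for t, pos in enumerate(track):
--         groups.setdefault(pos, []).append(t)
--     results = []
--     for t1, (x1, y1) in enumerate(track):
--         cands = []
--         for (x2, y2), times in groups.items():
--             dist = abs(x2 - x1) + abs(y2 - y1)
--             if dist <= max_dist:
--                 for t2 in times:
--                     if t2 - t1 >= 3 and t2 - t1 > dist: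
--                         cands.append((t2, t2 - t1 - dist))
--         cands.sort(key=lambda p: p[0])
--         results.extend(v for _, v in cands)
--     return results
-- ===== Notes on version B (the rewrite author's own statement) =====
-- stated objective: alternative
-- what changed: A scans, for every t1, every later index t2 in a nested pass; B builds a coordinate-keyed dict of time indices once, and for each t1 gathers qualifying (t2, saving) pairs from the buckets (computing each distinct coordinate's distance once) and sorts them back into t2 order.
import Mathlib
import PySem

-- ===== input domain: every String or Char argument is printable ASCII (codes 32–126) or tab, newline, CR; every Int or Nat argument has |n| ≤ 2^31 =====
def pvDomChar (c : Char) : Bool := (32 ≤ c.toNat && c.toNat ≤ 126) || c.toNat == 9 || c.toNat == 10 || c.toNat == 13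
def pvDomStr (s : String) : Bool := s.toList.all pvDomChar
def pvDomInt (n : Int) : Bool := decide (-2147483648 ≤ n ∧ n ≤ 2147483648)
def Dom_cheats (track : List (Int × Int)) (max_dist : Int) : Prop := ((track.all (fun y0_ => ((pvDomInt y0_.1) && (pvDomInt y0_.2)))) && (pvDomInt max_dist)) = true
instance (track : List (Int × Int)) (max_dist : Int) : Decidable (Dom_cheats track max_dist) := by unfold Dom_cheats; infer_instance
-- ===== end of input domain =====

-- B replaces A's per-t1 suffix scan by a coordinate-keyed grouping built once, gathering each
-- t1's partners from the buckets and sorting them back into t2 order (objective: alternative).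

-- ===== PORT A =====
-- literal port of A: for each t1, scan all later indices t2 ≥ t1+3.
-- (track[t2] is ported as pyGetD with a dummy default: t2 always lies in range here, so it is exact.)
def cheats (track : List (Int × Int)) (max_dist : Int) : List Int :=
  (PySem.List.enumerate track).foldl (fun results tp =>
    (PySem.List.pyRange (tp.1 + 3) (track.length : Int)).foldl (fun results t2 =>
      let p2 := PySem.List.pyGetD track t2 (0, 0)
      let dist := |p2.1 - tp.2.1| + |p2.2 - tp.2.2|
      if dist ≤ max_dist ∧ t2 - tp.1 > dist then results ++ [t2 - tp.1 - dist] else results)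
      results) []

-- ===== PORT B =====
-- literal port of Source B: group times by coordinate once; per t1 gather qualifying
-- (t2, saving) pairs from the buckets, sort them by t2, and emit the savings.
def cheats_alt (track : List (Int × Int)) (max_dist : Int) : List Int :=
  let groups : PySem.Dict (Int × Int) (List Int) :=
    (PySem.List.enumerate track).foldl
      (fun d tp => d.modify tp.2 [] (fun ts => ts ++ [tp.1])) PySem.Dict.empty
  (PySem.List.enumerate track).foldl (fun results tp =>
    let cands := groups.items.foldl (fun cands kv =>
      let dist := |kv.1.1 - tp.2.1| + |kv.1.2 - tp.2.2|
      if dist ≤ max_dist then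
        kv.2.foldl (fun cands t2 =>
          if t2 - tp.1 ≥ 3 ∧ t2 - tp.1 > dist then cands ++ [(t2, t2 - tp.1 - dist)] else cands) cands
      else cands) []
    results ++ (PySem.List.sorted cands (fun p => p.1)).map (fun p => p.2)) []

-- ===== PRECONDITION & SPEC =====
def Spec_cheats (track : List (Int × Int)) (max_dist : Int) (out : List Int) : Prop := out = cheats_alt track max_dist
instance (track : List (Int × Int)) (max_dist : Int) (out : List Int) : Decidable (Spec_cheats track max_dist out) := by unfold Spec_cheats; infer_instance

-- ===== CLAIM (what is proved, stated in full; the proofs are below) =====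
def Claim_equal_cheats : Prop := ∀ (track : List (Int × Int)) (max_dist : Int), Dom_cheats track max_dist → Spec_cheats track max_dist (cheats track max_dist)

-- ===== LEMMAS AND PROOFS =====

-- A's per-t1 row as a filterMap
def pvRowA (track : List (Int × Int)) (max_dist : Int) (tp : Int × (Int × Int)) : List Int :=
  (PySem.List.pyRange (tp.1 + 3) (track.length : Int)).filterMap (fun t2 =>
    let p2 := PySem.List.pyGetD track t2 (0, 0)
    let dist := |p2.1 - tp.2.1| + |p2.2 - tp.2.2|
    if dist ≤ max_dist ∧ t2 - tp.1 > dist then some (t2 - tp.1 - dist) else none)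

-- B's per-t1 row, exactly as it appears in cheats_alt
def pvRowB (track : List (Int × Int)) (max_dist : Int) (tp : Int × (Int × Int)) : List Int :=
  let groups : PySem.Dict (Int × Int) (List Int) :=
    (PySem.List.enumerate track).foldl
      (fun d tp => d.modify tp.2 [] (fun ts => ts ++ [tp.1])) PySem.Dict.empty
  let cands := groups.items.foldl (fun cands kv =>
    let dist := |kv.1.1 - tp.2.1| + |kv.1.2 - tp.2.2|
    if dist ≤ max_dist then
      kv.2.foldl (fun cands t2 =>
        if t2 - tp.1 ≥ 3 ∧ t2 - tp.1 > dist then cands ++ [(t2, t2 - tp.1 - dist)] else cands) cands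
    else cands) []
  (PySem.List.sorted cands (fun p => p.1)).map (fun p => p.2)

-- flatten a bucket list back to (coordinate, time) pairs
def pvFlat (its : List ((Int × Int) × List Int)) : List ((Int × Int) × Int) :=
  its.flatMap (fun kv => kv.2.map (fun v => (kv.1, v)))

-- a conditional-append loop is a filterMap
theorem pv_foldl_append_ite {α β : Type} (P : α → Prop) [DecidablePred P] (f : α → β)
    (l : List α) (acc : List β) :
    l.foldl (fun acc x => if P x then acc ++ [f x] else acc) acc
      = acc ++ l.filterMap (fun x => if P x then some (f x) else none) := by
  induction l generalizing acc with
  | nil => simp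
  | cons x t ih => by_cases h : P x <;> simp [h, ih]

-- appending v to the bucket of key k moves (k, v) to the end, up to permutation
theorem pv_flat_update (its : List ((Int × Int) × List Int)) (k : Int × Int) (ts : List Int) (v : Int)
    (hnd : (its.map (·.1)).Nodup) (hmem : (k, ts) ∈ its) :
    (pvFlat (its.map (fun p => if p.1 == k then (k, ts ++ [v]) else p))).Perm (pvFlat its ++ [(k, v)]) := by
  induction its with
  | nil => simp at hmem
  | cons hd tl ih =>
    simp only [List.map_cons, List.nodup_cons] at hnd
    rcases List.mem_cons.mp hmem with heq | hmem'
    · subst heq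
      have hid : tl.map (fun p => if p.1 == k then (k, ts ++ [v]) else p) = tl := by
        conv_rhs => rw [← List.map_id tl]
        refine List.map_congr_left (fun p hp => ?_)
        have : ¬ (p.1 == k) = true := by
          intro hb
          exact hnd.1 (by simpa [← beq_iff_eq.mp hb] using List.mem_map_of_mem (f := (·.1)) hp)
        simp [this]
      simp only [List.map_cons, hid, beq_self_eq_true, if_pos, pvFlat, List.flatMap_cons]
      simp only [List.map_append, List.map_cons, List.map_nil, List.append_assoc]
      refine List.Perm.append_left _ ?_
      simpa using List.perm_append_comm (l₁ := [((k : Int × Int), v)]) (l₂ := tl.flatMap (fun kv => kv.2.map (fun v => (kv.1, v))))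
    · have hne : ¬ (hd.1 == k) = true := by
        intro hb
        exact hnd.1 (by simpa [beq_iff_eq.mp hb] using List.mem_map_of_mem (f := (·.1)) hmem')
      have ihp := ih hnd.2 hmem'
      simp only [List.map_cons, if_neg hne, pvFlat, List.flatMap_cons, List.append_assoc] at *
      exact List.Perm.append_left _ ihp

theorem pv_flat_modify (d : PySem.Dict (Int × Int) (List Int)) (k : Int × Int) (v : Int)
    (hnd : d.keys.Nodup) :
    (pvFlat (d.modify k [] (fun ts => ts ++ [v])).items).Perm (pvFlat d.items ++ [(k, v)]) := by
  unfold PySem.Dict.modify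
  by_cases hc : d.contains k = true
  · obtain ⟨ts, hts⟩ := Option.isSome_iff_exists.mp (by rw [← PySem.Dict.contains_eq_isSome_get? d k]; exact hc)
    have hmem := PySem.Dict.mem_items_of_get?_eq_some d hts
    rw [PySem.Dict.items_insert_of_contains d _ hc,
        PySem.Dict.getD_of_get?_eq_some d [] hts]
    exact pv_flat_update d.items k ts v hnd hmem
  · rw [PySem.Dict.items_insert_of_not_contains d _ (by simpa using hc),
        PySem.Dict.getD_of_not_contains d [] (by simpa using hc)]
    simp [pvFlat]

-- the grouping fold flattens back to the input pairs, up to permutation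
theorem pv_flat_fold (l : List ((Int × Int) × Int)) :
    ∀ (d : PySem.Dict (Int × Int) (List Int)), d.keys.Nodup →
    (pvFlat (l.foldl (fun d p => d.modify p.1 [] (fun ts => ts ++ [p.2])) d).items).Perm
      (pvFlat d.items ++ l) := by
  induction l with
  | nil => intro d hnd; simp
  | cons p l ih =>
    intro d hnd
    have hnd' : ((d.modify p.1 [] (fun ts => ts ++ [p.2])).keys).Nodup := by
      simpa using PySem.Dict.nodup_keys_foldl_modify_key [p] (·.1) [] (fun _ q ts => ts ++ [q.2]) d hnd
    simp only [List.foldl_cons]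
    refine (ih _ hnd').trans ?_
    have := List.Perm.append_right l (pv_flat_modify d p.1 p.2 hnd)
    simpa using this

-- restriction of a full-range filterMap to the suffix range
theorem pv_range_restrict (t1 : Int) (ht : 0 ≤ t1) (n : Nat) (h : Int → Option Int) :
    (PySem.List.pyRange 0 (n : Int)).filterMap (fun j => if 3 ≤ j - t1 then h j else none)
      = (PySem.List.pyRange (t1 + 3) (n : Int)).filterMap h := by
  by_cases hn : t1 + 3 ≤ (n : Int)
  · rw [PySem.List.pyRange_one_append 0 (t1 + 3) (n : Int) (by omega) hn, List.filterMap_append]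
    have h1 : (PySem.List.pyRange 0 (t1 + 3)).filterMap (fun j => if 3 ≤ j - t1 then h j else none) = [] := by
      rw [List.filterMap_eq_nil_iff]
      intro j hj
      have := PySem.List.mem_pyRange_one.mp hj
      rw [if_neg (by omega)]
    have h2 : (PySem.List.pyRange (t1 + 3) (n : Int)).filterMap (fun j => if 3 ≤ j - t1 then h j else none)
        = (PySem.List.pyRange (t1 + 3) (n : Int)).filterMap h := by
      refine List.filterMap_congr (fun j hj => ?_)
      have := PySem.List.mem_pyRange_one.mp hj
      rw [if_pos (by omega)]
    rw [h1, h2, List.nil_append]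
  · rw [PySem.List.pyRange_one_eq_nil (a := t1 + 3) (b := (n : Int)) (by omega),
      List.filterMap_nil, List.filterMap_eq_nil_iff]
    intro j hj
    have := PySem.List.mem_pyRange_one.mp hj
    rw [if_neg (by omega)]

-- the heart: B's gathered-and-sorted row equals A's in-order row
theorem pv_row_eq (track : List (Int × Int)) (max_dist : Int) (tp : Int × (Int × Int))
    (ht : 0 ≤ tp.1) : pvRowB track max_dist tp = pvRowA track max_dist tp := by
  unfold pvRowB
  obtain ⟨t1, x1, y1⟩ := tp
  simp only at ht ⊢
  set D : Int × Int → Int := fun k => |k.1 - x1| + |k.2 - y1| with hD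
  set F : (Int × Int) → Int → Option (Int × Int) := fun k t2 =>
    if D k ≤ max_dist ∧ (t2 - t1 ≥ 3 ∧ t2 - t1 > D k) then some (t2, t2 - t1 - D k) else none with hF
  set groups : PySem.Dict (Int × Int) (List Int) :=
    (PySem.List.enumerate track).foldl
      (fun d tp => d.modify tp.2 [] (fun ts => ts ++ [tp.1])) PySem.Dict.empty with hgroups
  -- step 1: the cands loop is a flatMap of per-bucket filterMaps
  have hc1 : groups.items.foldl (fun cands kv =>
      if |kv.1.1 - x1| + |kv.1.2 - y1| ≤ max_dist then
        kv.2.foldl (fun cands t2 =>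
          if t2 - t1 ≥ 3 ∧ t2 - t1 > |kv.1.1 - x1| + |kv.1.2 - y1| then
            cands ++ [(t2, t2 - t1 - (|kv.1.1 - x1| + |kv.1.2 - y1|))]
          else cands) cands
      else cands) []
      = groups.items.flatMap (fun kv => kv.2.filterMap (F kv.1)) := by
    have : (fun (cands : List (Int × Int)) (kv : (Int × Int) × List Int) =>
        if |kv.1.1 - x1| + |kv.1.2 - y1| ≤ max_dist then
          kv.2.foldl (fun cands t2 =>
            if t2 - t1 ≥ 3 ∧ t2 - t1 > |kv.1.1 - x1| + |kv.1.2 - y1| then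
              cands ++ [(t2, t2 - t1 - (|kv.1.1 - x1| + |kv.1.2 - y1|))]
            else cands) cands
        else cands)
        = fun cands kv => cands ++ kv.2.filterMap (F kv.1) := by
      funext cands kv
      by_cases hd : |kv.1.1 - x1| + |kv.1.2 - y1| ≤ max_dist
      · simp only [hd, if_pos]
        rw [pv_foldl_append_ite (fun t2 => t2 - t1 ≥ 3 ∧ t2 - t1 > (|kv.1.1 - x1| + |kv.1.2 - y1|))
          (fun t2 => (t2, t2 - t1 - (|kv.1.1 - x1| + |kv.1.2 - y1|))) kv.2 cands]
        congr 1
        refine List.filterMap_congr (fun t2 _ => ?_)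
        simp only [hF, hD]
        split_ifs with h1 h2 h2 <;> try rfl
        · exact absurd ⟨hd, h1⟩ h2
        · exact absurd h2.2 h1
      · simp only [hd, if_neg, not_false_iff]
        have : kv.2.filterMap (F kv.1) = [] := by
          rw [List.filterMap_eq_nil_iff]
          intro t2 _
          simp only [hF, hD]
          rw [if_neg (by tauto)]
        rw [this, List.append_nil]
    rw [this, PySem.List.foldl_append_eq_flatMap, List.nil_append]
  -- step 2: flatMap of bucket filterMaps = filterMap over the flattened pairs
  have hc2 : groups.items.flatMap (fun kv => kv.2.filterMap (F kv.1))
      = (pvFlat groups.items).filterMap (fun p => F p.1 p.2) := by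
    rw [pvFlat, List.filterMap_flatMap]
    refine List.flatMap_congr (fun kv _ => ?_)
    rw [List.filterMap_map]
    rfl
  -- step 3: the flattened buckets are a permutation of the (coordinate, time) pairs of the track
  have hperm : (pvFlat groups.items).Perm ((PySem.List.enumerate track).map (fun q => (q.2, q.1))) := by
    have hfold : groups = ((PySem.List.enumerate track).map (fun q => (q.2, q.1))).foldl
        (fun d p => d.modify p.1 [] (fun ts => ts ++ [p.2])) PySem.Dict.empty := by
      rw [hgroups, List.foldl_map]
    rw [hfold]
    simpa using pv_flat_fold ((PySem.List.enumerate track).map (fun q => (q.2, q.1)))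
      PySem.Dict.empty PySem.Dict.nodup_keys_empty
  -- the canonical in-t2-order pair list
  set canon : List (Int × Int) := (PySem.List.enumerate track).filterMap (fun q => F q.2 q.1) with hcanon
  have hc3 : ((PySem.List.enumerate track).map (fun q => (q.2, q.1))).filterMap (fun p => F p.1 p.2) = canon := by
    rw [List.filterMap_map]; rfl
  have hpc : canon.Perm ((pvFlat groups.items).filterMap (fun p => F p.1 p.2)) := by
    rw [← hc3]
    exact (hperm.filterMap _).symm
  -- step 4: canon is strictly increasing in the time component
  have hpw : canon.Pairwise (fun a b => a.1 < b.1) := by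
    rw [hcanon, List.pairwise_filterMap]
    refine (PySem.List.pairwise_lt_enumerate track 0).imp ?_
    intro a b hab p hp q hq
    simp only [hF] at hp hq
    split_ifs at hp hq
    · obtain rfl := Option.some_inj.mp hp
      obtain rfl := Option.some_inj.mp hq
      exact hab
  -- step 5: sorting recovers canon
  have hsort : PySem.List.sorted ((pvFlat groups.items).filterMap (fun p => F p.1 p.2)) (fun p => p.1) = canon :=
    PySem.List.sorted_eq_of_perm_of_pairwise_lt _ canon (fun p => p.1) hpc hpw
  -- step 6: assemble
  set h : Int → Option Int := fun j =>
    let p2 := PySem.List.pyGetD track j (0, 0)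
    let dist := |p2.1 - x1| + |p2.2 - y1|
    if dist ≤ max_dist ∧ j - t1 > dist then some (j - t1 - dist) else none with hh
  rw [hc1, hc2, hsort, hcanon, List.map_filterMap]
  rw [PySem.List.enumerate_eq_map_pyRange track ((0 : Int), (0 : Int)), List.filterMap_map]
  have hstep : ∀ j : Int,
      ((fun q => Option.map (fun p => p.2) (F (q.2) (q.1))) ∘ (fun j => (j, PySem.List.pyGetD track j (0, 0)))) j
        = if 3 ≤ j - t1 then h j else none := by
    intro j
    simp only [Function.comp, hF, hh]
    split_ifs <;> simp_all
  rw [List.filterMap_congr (fun j _ => hstep j)]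
  have hlen : PySem.List.len track = (track.length : Int) := rfl
  rw [hlen, pv_range_restrict t1 ht track.length h]
  rfl

theorem cheats_eq_flatMap (track : List (Int × Int)) (max_dist : Int) :
    cheats track max_dist = (PySem.List.enumerate track).flatMap (pvRowA track max_dist) := by
  unfold cheats
  have hfun : (fun (results : List Int) (tp : Int × (Int × Int)) =>
      (PySem.List.pyRange (tp.1 + 3) (track.length : Int)).foldl (fun results t2 =>
        let p2 := PySem.List.pyGetD track t2 (0, 0)
        let dist := |p2.1 - tp.2.1| + |p2.2 - tp.2.2|
        if dist ≤ max_dist ∧ t2 - tp.1 > dist then results ++ [t2 - tp.1 - dist] else results)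
        results)
      = fun results tp => results ++ pvRowA track max_dist tp := by
    funext results tp
    show (PySem.List.pyRange (tp.1 + 3) (track.length : Int)).foldl (fun results t2 =>
        if |(PySem.List.pyGetD track t2 (0, 0)).1 - tp.2.1| + |(PySem.List.pyGetD track t2 (0, 0)).2 - tp.2.2| ≤ max_dist
            ∧ t2 - tp.1 > |(PySem.List.pyGetD track t2 (0, 0)).1 - tp.2.1| + |(PySem.List.pyGetD track t2 (0, 0)).2 - tp.2.2|
          then results ++ [t2 - tp.1 - (|(PySem.List.pyGetD track t2 (0, 0)).1 - tp.2.1| + |(PySem.List.pyGetD track t2 (0, 0)).2 - tp.2.2|)]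
          else results) results = results ++ pvRowA track max_dist tp
    rw [pv_foldl_append_ite]
    rfl
  rw [hfun, PySem.List.foldl_append_eq_flatMap, List.nil_append]

theorem cheats_alt_eq_flatMap (track : List (Int × Int)) (max_dist : Int) :
    cheats_alt track max_dist = (PySem.List.enumerate track).flatMap (pvRowB track max_dist) := by
  show (PySem.List.enumerate track).foldl
      (fun results tp => results ++ pvRowB track max_dist tp) [] = _
  rw [PySem.List.foldl_append_eq_flatMap, List.nil_append]

-- ===== VERDICT (by name: the statement is the Claim_ definition above) =====
theorem cheats_spec : Claim_equal_cheats := by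
  intro track max_dist _
  unfold Spec_cheats
  rw [cheats_eq_flatMap, cheats_alt_eq_flatMap]
  refine List.flatMap_congr (fun tp hmem => ?_)
  obtain ⟨k, hk, rfl⟩ := (PySem.List.mem_enumerate_iff track 0 tp).mp hmem
  exact (pv_row_eq track max_dist _ (by simp)).symm
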